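-- pv_equiv track=rewrite | github.com/MariiaNikitash/Data-Structures-w-Python | CodePath_TIP102/stacks_queues/standart1.py | edit_post
-- ===== SOURCE A (Python) =====
-- from collections import deque
--
-- def edit_post(post):
--     stack = deque()
--     res = []
--     for c in post:
--         if c != ' ':
--             stack.append(c)
--         else:
--             while stack:
--                 res.append(stack.pop())
--             res.append(' ')
--
--     while stack:
--         res.append(stack.pop())
--
--     return ''.join(res)
-- ===== SOURCE B (Python) =====
-- def edit_post(post):
--     return ' '.join(word[::-1] for word in post.split(' '))
-- ===== Notes on version B (the rewrite author's own statement) =====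
-- stated objective: simpler
-- what changed: Replaces the character-by-character deque-stack/result-list loop with splitting on the single-space separator, slice-reversing each token, and one join.
import Mathlib
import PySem

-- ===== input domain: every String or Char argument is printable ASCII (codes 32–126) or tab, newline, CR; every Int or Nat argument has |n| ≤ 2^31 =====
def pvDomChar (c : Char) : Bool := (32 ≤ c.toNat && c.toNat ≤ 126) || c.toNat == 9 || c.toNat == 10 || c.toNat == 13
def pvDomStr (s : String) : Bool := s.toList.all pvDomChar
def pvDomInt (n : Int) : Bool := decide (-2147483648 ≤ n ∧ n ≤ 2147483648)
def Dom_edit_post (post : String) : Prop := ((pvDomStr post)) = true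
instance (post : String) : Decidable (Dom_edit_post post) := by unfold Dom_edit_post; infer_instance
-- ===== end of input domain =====

-- B replaces A's character-by-character deque-stack loop by splitting on the single-space separator, reversing each token, and joining (simpler decomposition; measured faster by constant factor).

-- ===== PORT A =====
-- 'while stack: res.append(stack.pop())': the stack is kept top-at-head, so popping all of it appends its elements in order
def pvDrain : List Char → List Char → List Char
  | [], res => res
  | c :: st, res => pvDrain st (res ++ [c])

-- one iteration of 'for c in post'; state = (stack, res)
def pvStepA (st : List Char × List Char) (c : Char) : List Char × List Char :=
  if c ≠ ' ' then (c :: st.1, st.2) else ([], pvDrain st.1 st.2 ++ [' '])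

def edit_post (post : String) : String :=
  let fin := post.toList.foldl pvStepA ([], [])
  String.ofList (pvDrain fin.1 fin.2)

-- ===== PORT B =====
-- splitting on the (nonempty) single-space separator always returns (split? = some …), and w[::-1] with step -1 always returns, so getD's defaults are never used
def edit_post_alt (post : String) : String :=
  PySem.Str.join " "
    (((PySem.Str.split? post " ").getD []).map
      (fun w => (PySem.Str.slice? w none none (-1)).getD ""))

-- ===== PRECONDITION & SPEC =====
def Spec_edit_post (post : String) (out : String) : Prop := out = edit_post_alt post
instance (post : String) (out : String) : Decidable (Spec_edit_post post out) := by unfold Spec_edit_post; infer_instance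

-- ===== CLAIM (what is proved, stated in full; the proofs are below) =====
def Claim_equal_edit_post : Prop := ∀ (post : String), Dom_edit_post post → Spec_edit_post post (edit_post post)

-- ===== LEMMAS AND PROOFS =====

-- reference splitter: splitOn on separator [' '] without fuel
def pvSplitSp : List Char → List Char → List (List Char) → List (List Char)
  | [], cur, acc => (cur.reverse :: acc).reverse
  | c :: rest, cur, acc =>
      if c = ' ' then pvSplitSp rest [] (cur.reverse :: acc) else pvSplitSp rest (c :: cur) acc

theorem pvDrain_eq (st res : List Char) : pvDrain st res = res ++ st := by
  induction st generalizing res with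
  | nil => simp [pvDrain]
  | cons c st ih => simp [pvDrain, ih]

theorem pvSplitSp_cons (c : Char) (rest cur : List Char) (acc : List (List Char)) :
    pvSplitSp (c :: rest) cur acc =
      if c = ' ' then pvSplitSp rest [] (cur.reverse :: acc) else pvSplitSp rest (c :: cur) acc := rfl

theorem pvSplitSp_acc (l : List Char) (cur : List Char) (acc : List (List Char)) :
    pvSplitSp l cur acc = acc.reverse ++ pvSplitSp l cur [] := by
  induction l generalizing cur acc with
  | nil => simp [pvSplitSp]
  | cons c rest ih =>
      rw [pvSplitSp_cons, pvSplitSp_cons]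
      by_cases h : c = ' '
      · rw [if_pos h, if_pos h, ih [] (cur.reverse :: acc), ih [] [cur.reverse]]
        simp
      · rw [if_neg h, if_neg h]
        exact ih (c :: cur) acc

theorem pvSplitSp_ne_nil (l cur : List Char) (acc : List (List Char)) : pvSplitSp l cur acc ≠ [] := by
  induction l generalizing cur acc with
  | nil => simp [pvSplitSp]
  | cons c rest ih =>
      rw [pvSplitSp_cons]
      by_cases h : c = ' '
      · rw [if_pos h]; exact ih [] _
      · rw [if_neg h]; exact ih (c :: cur) acc

theorem pvGo_eq (fuel : Nat) (l cur : List Char) (acc : List (List Char)) (h : l.length < fuel) :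
    PySem.Chars.splitOn.go [' '] fuel l cur acc = pvSplitSp l cur acc := by
  induction fuel generalizing l cur acc with
  | zero => omega
  | succ fuel ih =>
      cases l with
      | nil => simp [PySem.Chars.splitOn.go, pvSplitSp]
      | cons c rest =>
          simp only [PySem.Chars.splitOn.go, pvSplitSp]
          by_cases h' : c = ' '
          · subst h'
            rw [if_pos (by simp [List.isPrefixOf]), if_pos rfl]
            simpa using ih rest [] (cur.reverse :: acc) (by simp at h; omega)
          · rw [if_neg (by simp [List.isPrefixOf]; exact fun hc => absurd hc.symm h'), if_neg h']
            exact ih rest (c :: cur) acc (by simp at h; omega)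

theorem pvSplitOn_eq (l : List Char) : PySem.Chars.splitOn l [' '] = pvSplitSp l [] [] := by
  unfold PySem.Chars.splitOn
  exact pvGo_eq _ _ _ _ (by omega)

theorem pvJoin_cons (a : List Char) (ts : List (List Char)) (h : ts ≠ []) :
    PySem.Chars.join [' '] (a :: ts) = a ++ [' '] ++ PySem.Chars.join [' '] ts := by
  cases ts with
  | nil => exact absurd rfl h
  | cons b ts => simp [PySem.Chars.join, List.intercalate, List.intersperse]

-- main invariant relating A's fold state to the reference splitter
theorem pvInvariant (l : List Char) (stack res : List Char) :
    pvDrain (l.foldl pvStepA (stack, res)).1 (l.foldl pvStepA (stack, res)).2 =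
    res ++ PySem.Chars.join [' '] ((pvSplitSp l stack []).map List.reverse) := by
  induction l generalizing stack res with
  | nil =>
      simp [pvSplitSp, pvDrain_eq, PySem.Chars.join, List.intercalate]
  | cons c rest ih =>
      by_cases h : c = ' '
      · subst h
        simp only [List.foldl_cons, pvStepA, ne_eq, not_true_eq_false, if_false]
        rw [ih, pvSplitSp_cons, if_pos rfl, pvSplitSp_acc rest [] [stack.reverse]]
        simp only [List.reverse_cons, List.reverse_nil, List.nil_append, List.singleton_append,
          List.map_cons, List.reverse_reverse]
        rw [pvJoin_cons _ _ (fun hnil =>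
          pvSplitSp_ne_nil rest [] [] (List.map_eq_nil_iff.mp hnil))]
        simp [pvDrain_eq]
      · simp only [List.foldl_cons, pvStepA, ne_eq, h, not_false_eq_true, if_pos]
        rw [ih, pvSplitSp_cons, if_neg h]

theorem pvAlt_eq (post : String) :
    edit_post_alt post =
      String.ofList (PySem.Chars.join [' ']
        ((PySem.Chars.splitOn post.toList [' ']).map List.reverse)) := by
  unfold edit_post_alt
  simp [PySem.Str.split?, PySem.Chars.split?, PySem.Str.join,
    PySem.Str.slice?_none_none_neg_one, List.map_map, Function.comp_def]

-- ===== VERDICT (by name: the statement is the Claim_ definition above) =====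
theorem edit_post_spec : Claim_equal_edit_post := by
  intro post _
  unfold Spec_edit_post edit_post
  rw [pvAlt_eq, pvSplitOn_eq]
  show String.ofList (pvDrain (post.toList.foldl pvStepA ([], [])).1
      (post.toList.foldl pvStepA ([], [])).2) = _
  rw [pvInvariant]
  simp
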